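-- pv_equiv track=rewrite | github.com/rifle-ak/Bastion-Server | agent/tools/mod_conflict_check.py | _build_mod_report
-- ===== SOURCE A (Python) =====
-- def _build_mod_report(
--     server: str,
--     container: str,
--     game_type: str,
--     conflicts: list[dict[str, str]],
--     crashes: list[dict[str, str]],
-- ) -> str:
--     """Build a human-readable mod conflict and crash report.
--
--     Standalone function for testability — no side effects, pure string
--     assembly from structured data.
--
--     Args:
--         server: Server name from inventory.
--         container: Docker container name.
--         game_type: Detected or specified game type.
--         conflicts: List of conflict dicts from conflict checking.
--         crashes: List of crash issue dicts from log parsing.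
--
--     Returns:
--         Formatted report string.
--     """
--     all_issues = conflicts + crashes
--
--     # Sort by severity: critical first, then warning, then info
--     severity_order = {"critical": 0, "warning": 1, "info": 2}
--     all_issues.sort(key=lambda x: severity_order.get(x.get("severity", "info"), 3))
--
--     lines: list[str] = []
--     lines.append(f"=== MOD/PLUGIN CONFLICT REPORT ===")
--     lines.append(f"Server: {server}")
--     lines.append(f"Container: {container}")
--     lines.append(f"Game Type: {game_type}")
--     lines.append("")
--
--     critical_count = sum(1 for i in all_issues if i.get("severity") == "critical")
--     warning_count = sum(1 for i in all_issues if i.get("severity") == "warning")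
--     info_count = sum(1 for i in all_issues if i.get("severity") == "info")
--
--     lines.append(f"Issues found: {len(all_issues)} "
--                  f"({critical_count} critical, {warning_count} warnings, {info_count} info)")
--     lines.append("")
--
--     if not all_issues:
--         lines.append("No conflicts or crash patterns detected. Server looks clean.")
--         return "\n".join(lines)
--
--     for i, issue in enumerate(all_issues, 1):
--         severity = issue.get("severity", "info").upper()
--         lines.append(f"--- Issue #{i} [{severity}] ---")
--
--         if issue.get("conflicting_plugins"):
--             lines.append(f"Plugins: {issue['conflicting_plugins']}")
--
--         lines.append(f"Problem: {issue.get('description', 'Unknown')}")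
--         lines.append(f"Fix: {issue.get('recommendation', 'No recommendation available.')}")
--         lines.append("")
--
--     if critical_count > 0:
--         lines.append("ACTION REQUIRED: Critical issues detected that will cause server "
--                      "instability or crashes. Address these before restarting.")
--
--     return "\n".join(lines)
-- ===== SOURCE B (Python) =====
-- def _build_mod_report(
--     server: str,
--     container: str,
--     game_type: str,
--     conflicts: list[dict[str, str]],
--     crashes: list[dict[str, str]],
-- ) -> str:
--     """Bucket issues by severity in one pass instead of sorting; counts come
--     from the same pass (on the exact severity value, so a missing severity is
--     ordered as info but counted in none, exactly as the sort-based version)."""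
--     crit: list = []
--     warn: list = []
--     info: list = []
--     other: list = []
--     ncrit = nwarn = ninfo = 0
--     for issue in conflicts + crashes:
--         sev = issue.get("severity")
--         if sev == "critical":
--             ncrit += 1
--             crit.append(issue)
--         elif sev == "warning":
--             nwarn += 1
--             warn.append(issue)
--         elif sev == "info":
--             ninfo += 1
--             info.append(issue)
--         elif sev is None:
--             info.append(issue)  # missing severity sorts as info, counted in none
--         else:
--             other.append(issue)  # unknown severity sorts last
--     ordered = crit + warn + info + other
--
--     lines = [
--         "=== MOD/PLUGIN CONFLICT REPORT ===",
--         f"Server: {server}",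
--         f"Container: {container}",
--         f"Game Type: {game_type}",
--         "",
--         f"Issues found: {len(ordered)} ({ncrit} critical, {nwarn} warnings, {ninfo} info)",
--         "",
--     ]
--
--     if not ordered:
--         lines.append("No conflicts or crash patterns detected. Server looks clean.")
--         return "\n".join(lines)
--
--     for i, issue in enumerate(ordered, 1):
--         block = [f"--- Issue #{i} [{issue.get('severity', 'info').upper()}] ---"]
--         if issue.get("conflicting_plugins"):
--             block.append(f"Plugins: {issue['conflicting_plugins']}")
--         block.append(f"Problem: {issue.get('description', 'Unknown')}")
--         block.append(f"Fix: {issue.get('recommendation', 'No recommendation available.')}")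
--         block.append("")
--         lines.extend(block)
--
--     if ncrit:
--         lines.append("ACTION REQUIRED: Critical issues detected that will cause server "
--                      "instability or crashes. Address these before restarting.")
--
--     return "\n".join(lines)
-- ===== Notes on version B (the rewrite author's own statement) =====
-- stated objective: alternative
-- what changed: Replaces the severity-key sort plus three separate counting passes by a single pass that buckets each issue into critical/warning/info/other lists (stable bucketing equals the stable sort on the 4-valued key) and accumulates the three counts on the exact severity value in the same pass.
import Mathlib
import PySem

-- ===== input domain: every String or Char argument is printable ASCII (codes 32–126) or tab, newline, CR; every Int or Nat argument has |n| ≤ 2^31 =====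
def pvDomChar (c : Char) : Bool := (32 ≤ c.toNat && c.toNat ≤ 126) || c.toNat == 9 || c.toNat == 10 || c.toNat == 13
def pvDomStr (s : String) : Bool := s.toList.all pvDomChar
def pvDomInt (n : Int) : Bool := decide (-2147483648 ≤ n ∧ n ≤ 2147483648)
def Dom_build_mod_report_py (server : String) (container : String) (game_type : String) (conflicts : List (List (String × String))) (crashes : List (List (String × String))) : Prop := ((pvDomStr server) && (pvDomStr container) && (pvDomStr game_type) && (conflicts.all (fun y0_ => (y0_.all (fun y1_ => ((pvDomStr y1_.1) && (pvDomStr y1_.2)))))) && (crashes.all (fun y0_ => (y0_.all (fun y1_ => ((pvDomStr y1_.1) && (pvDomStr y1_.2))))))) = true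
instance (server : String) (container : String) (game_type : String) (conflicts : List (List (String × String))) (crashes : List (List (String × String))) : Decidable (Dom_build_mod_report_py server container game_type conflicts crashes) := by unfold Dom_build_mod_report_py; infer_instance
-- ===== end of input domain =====

-- B replaces A's sort-with-severity-key plus three separate counting passes by a
-- single bucketing pass that also accumulates the counts (stable bucketing = stable
-- sort on a 4-valued key); the report text is assembled from the same pieces.

-- ===== PORT A =====

-- dict lookup d.get(k) on an association list (first match)
def pvGet? (d : List (String × String)) (k : String) : Option String :=
  (d.find? (fun p => p.1 == k)).map (·.2)

-- d.get(k, dflt)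
def pvGetD (d : List (String × String)) (k dflt : String) : String :=
  (pvGet? d k).getD dflt

-- severity_order = {"critical": 0, "warning": 1, "info": 2}
def pvSevOrder : PySem.Dict String Int :=
  PySem.Dict.ofList [("critical", 0), ("warning", 1), ("info", 2)]

-- lambda x: severity_order.get(x.get("severity", "info"), 3)
def pvKeyA (x : List (String × String)) : Int :=
  pvSevOrder.getD (pvGetD x "severity" "info") 3

def build_mod_report_py (server : String) (container : String) (game_type : String) (conflicts : List (List (String × String))) (crashes : List (List (String × String))) : String :=
  let all_issues := conflicts ++ crashes
  let all_issues := PySem.List.sorted all_issues pvKeyA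
  let lines : List String := []
  let lines := lines ++ ["=== MOD/PLUGIN CONFLICT REPORT ==="]
  let lines := lines ++ ["Server: " ++ server]
  let lines := lines ++ ["Container: " ++ container]
  let lines := lines ++ ["Game Type: " ++ game_type]
  let lines := lines ++ [""]
  let critical_count : Int := (all_issues.countP (fun i => pvGet? i "severity" == some "critical") : Int)
  let warning_count : Int := (all_issues.countP (fun i => pvGet? i "severity" == some "warning") : Int)
  let info_count : Int := (all_issues.countP (fun i => pvGet? i "severity" == some "info") : Int)
  let lines := lines ++ ["Issues found: " ++ PySem.Int.toStr (all_issues.length : Int) ++ " (" ++ PySem.Int.toStr critical_count ++ " critical, " ++ PySem.Int.toStr warning_count ++ " warnings, " ++ PySem.Int.toStr info_count ++ " info)"]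
  let lines := lines ++ [""]
  if all_issues.isEmpty then
    PySem.Str.join "\n" (lines ++ ["No conflicts or crash patterns detected. Server looks clean."])
  else
    let lines := (PySem.List.enumerate all_issues 1).foldl (fun acc p =>
      let issue := p.2
      let severity := PySem.Str.upper (pvGetD issue "severity" "info")
      let acc := acc ++ ["--- Issue #" ++ PySem.Int.toStr p.1 ++ " [" ++ severity ++ "] ---"]
      let acc := if pvGetD issue "conflicting_plugins" "" ≠ "" then acc ++ ["Plugins: " ++ pvGetD issue "conflicting_plugins" ""] else acc
      let acc := acc ++ ["Problem: " ++ pvGetD issue "description" "Unknown"]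
      let acc := acc ++ ["Fix: " ++ pvGetD issue "recommendation" "No recommendation available."]
      acc ++ [""]) lines
    let lines := if critical_count > 0 then lines ++ ["ACTION REQUIRED: Critical issues detected that will cause server instability or crashes. Address these before restarting."] else lines
    PySem.Str.join "\n" lines

-- ===== PORT B =====

structure PvBState where
  crit : List (List (String × String))
  warn : List (List (String × String))
  info : List (List (String × String))
  other : List (List (String × String))
  ncrit : Int
  nwarn : Int
  ninfo : Int
deriving Repr, DecidableEq

-- one step of B's single bucketing-and-counting pass
def pvBStep (st : PvBState) (issue : List (String × String)) : PvBState :=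
  let sev := pvGet? issue "severity"
  if sev == some "critical" then { st with crit := st.crit ++ [issue], ncrit := st.ncrit + 1 }
  else if sev == some "warning" then { st with warn := st.warn ++ [issue], nwarn := st.nwarn + 1 }
  else if sev == some "info" then { st with info := st.info ++ [issue], ninfo := st.ninfo + 1 }
  else if sev == none then { st with info := st.info ++ [issue] }
  else { st with other := st.other ++ [issue] }

def build_mod_report_py_alt (server : String) (container : String) (game_type : String) (conflicts : List (List (String × String))) (crashes : List (List (String × String))) : String :=
  let st := (conflicts ++ crashes).foldl pvBStep ⟨[], [], [], [], 0, 0, 0⟩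
  let ordered := st.crit ++ st.warn ++ st.info ++ st.other
  let lines : List String := [
    "=== MOD/PLUGIN CONFLICT REPORT ===",
    "Server: " ++ server,
    "Container: " ++ container,
    "Game Type: " ++ game_type,
    "",
    "Issues found: " ++ PySem.Int.toStr (ordered.length : Int) ++ " (" ++ PySem.Int.toStr st.ncrit ++ " critical, " ++ PySem.Int.toStr st.nwarn ++ " warnings, " ++ PySem.Int.toStr st.ninfo ++ " info)",
    ""]
  if ordered.isEmpty then
    PySem.Str.join "\n" (lines ++ ["No conflicts or crash patterns detected. Server looks clean."])
  else
    let lines := (PySem.List.enumerate ordered 1).foldl (fun acc p =>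
      let issue := p.2
      let block := ["--- Issue #" ++ PySem.Int.toStr p.1 ++ " [" ++ PySem.Str.upper (pvGetD issue "severity" "info") ++ "] ---"]
      let block := block ++ (if pvGetD issue "conflicting_plugins" "" ≠ "" then ["Plugins: " ++ pvGetD issue "conflicting_plugins" ""] else [])
      let block := block ++ ["Problem: " ++ pvGetD issue "description" "Unknown"]
      let block := block ++ ["Fix: " ++ pvGetD issue "recommendation" "No recommendation available."]
      let block := block ++ [""]
      acc ++ block) lines
    let lines := if st.ncrit ≠ 0 then lines ++ ["ACTION REQUIRED: Critical issues detected that will cause server instability or crashes. Address these before restarting."] else lines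
    PySem.Str.join "\n" lines

-- ===== PRECONDITION & SPEC =====
def Spec_build_mod_report_py (server : String) (container : String) (game_type : String) (conflicts : List (List (String × String))) (crashes : List (List (String × String))) (out : String) : Prop := out = build_mod_report_py_alt server container game_type conflicts crashes
instance (server : String) (container : String) (game_type : String) (conflicts : List (List (String × String))) (crashes : List (List (String × String))) (out : String) : Decidable (Spec_build_mod_report_py server container game_type conflicts crashes out) := by unfold Spec_build_mod_report_py; infer_instance

-- ===== CLAIM (what is proved, stated in full; the proofs are below) =====
def Claim_equal_build_mod_report_py : Prop := ∀ (server : String) (container : String) (game_type : String) (conflicts : List (List (String × String))) (crashes : List (List (String × String))), Dom_build_mod_report_py server container game_type conflicts crashes → Spec_build_mod_report_py server container game_type conflicts crashes (build_mod_report_py server container game_type conflicts crashes)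

-- ===== LEMMAS AND PROOFS =====

-- the bucket predicates of B's pass
def pCrit (i : List (String × String)) : Bool := pvGet? i "severity" == some "critical"
def pWarn (i : List (String × String)) : Bool := pvGet? i "severity" == some "warning"
def pInfo (i : List (String × String)) : Bool := pvGet? i "severity" == some "info"
def pInfoB (i : List (String × String)) : Bool :=
  pvGet? i "severity" == some "info" || pvGet? i "severity" == none
def pOther (i : List (String × String)) : Bool := !(pCrit i) && !(pWarn i) && !(pInfoB i)

-- exactly one of crit/warn/infoB/other holds, with the stated truth values
theorem pred_cases (x : List (String × String)) :
    (pCrit x = true ∧ pWarn x = false ∧ pInfoB x = false) ∨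
    (pCrit x = false ∧ pWarn x = true ∧ pInfoB x = false) ∨
    (pCrit x = false ∧ pWarn x = false ∧ pInfoB x = true) ∨
    (pCrit x = false ∧ pWarn x = false ∧ pInfoB x = false) := by
  unfold pCrit pWarn pInfoB
  cases pvGet? x "severity" with
  | none => simp
  | some v =>
    by_cases h0 : v = "critical" <;> by_cases h1 : v = "warning" <;> by_cases h2 : v = "info" <;>
      simp_all

-- A's sort key, read off the bucket predicates
theorem keyA_eq (x : List (String × String)) :
    pvKeyA x = if pCrit x then 0 else if pWarn x then 1 else if pInfoB x then 2 else 3 := by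
  unfold pvKeyA pvGetD pCrit pWarn pInfoB
  cases h : pvGet? x "severity" with
  | none => simp only [h, Option.getD_none]; norm_num; decide
  | some v =>
    simp only [h, Option.getD_some]
    have e : pvSevOrder = PySem.Dict.mk [("critical", (0:Int)), ("warning", 1), ("info", 2)] := by
      decide
    rw [e, PySem.Dict.getD_eq_get?_getD]
    by_cases h0 : v = "critical"
    · subst h0; simp [PySem.Dict.get?_mk_cons]
    by_cases h1 : v = "warning"
    · subst h1; simp [PySem.Dict.get?_mk_cons]
    by_cases h2 : v = "info"
    · subst h2; simp [PySem.Dict.get?_mk_cons]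
    · simp [PySem.Dict.get?_mk_cons, PySem.Dict.get?, Ne.symm h0, Ne.symm h1, Ne.symm h2, h0, h1, h2]

theorem insertBy_append_skip {α : Type} (before : α → α → Bool) (x : α) (l₁ l₂ : List α)
    (h : ∀ y ∈ l₁, before x y = false) :
    PySem.List.insertBy before x (l₁ ++ l₂) = l₁ ++ PySem.List.insertBy before x l₂ := by
  induction l₁ with
  | nil => simp
  | cons y ys ih =>
    have hy := h y (by simp)
    simp [PySem.List.insertBy, hy, ih (fun z hz => h z (by simp [hz]))]

theorem insertBy_all_before {α : Type} (before : α → α → Bool) (x : α) (l : List α)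
    (h : ∀ y ∈ l, before x y = true) :
    PySem.List.insertBy before x l = x :: l := by
  cases l with
  | nil => simp [PySem.List.insertBy]
  | cons y ys => simp [PySem.List.insertBy, h y (by simp)]

-- stable insertion sort by the severity key = the four buckets in order
theorem sort_buckets_aux (xs : List (List (String × String))) :
    ∀ (C W I O : List (List (String × String))),
    (∀ y ∈ C, pvKeyA y = 0) → (∀ y ∈ W, pvKeyA y = 1) →
    (∀ y ∈ I, pvKeyA y = 2) → (∀ y ∈ O, pvKeyA y = 3) →
    xs.foldl (fun acc x => PySem.List.insertBy (fun a b => decide (pvKeyA a < pvKeyA b)) x acc) (C ++ (W ++ (I ++ O)))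
      = C ++ (xs.filter pCrit ++ (W ++ (xs.filter pWarn ++ (I ++ (xs.filter pInfoB ++ (O ++ xs.filter pOther)))))) := by
  induction xs with
  | nil => intro C W I O _ _ _ _; simp
  | cons x t ih =>
    intro C W I O hC hW hI hO
    simp only [List.foldl_cons]
    rcases pred_cases x with ⟨h1, h2, h3⟩ | ⟨h1, h2, h3⟩ | ⟨h1, h2, h3⟩ | ⟨h1, h2, h3⟩ <;>
      have h4 : pOther x = (!(pCrit x) && !(pWarn x) && !(pInfoB x)) := rfl <;>
      simp only [h1, h2, h3, Bool.not_true, Bool.not_false, Bool.and_self,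
        Bool.true_and, Bool.false_and, Bool.and_true, Bool.and_false] at h4 <;>
      have hv := keyA_eq x <;> simp only [h1, h2, h3, if_true, if_false] at hv
    · -- critical: insert at the end of C
      have step : PySem.List.insertBy (fun a b => decide (pvKeyA a < pvKeyA b)) x (C ++ (W ++ (I ++ O)))
          = (C ++ [x]) ++ (W ++ (I ++ O)) := by
        rw [insertBy_append_skip _ _ C _ (fun y hy => by simp [hv, hC y hy]),
            insertBy_all_before _ _ _ (fun y hy => by
              rcases List.mem_append.1 hy with hy | hy
              · simp [hv, hW y hy]
              · rcases List.mem_append.1 hy with hy | hy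
                · simp [hv, hI y hy]
                · simp [hv, hO y hy])]
        simp
      rw [step, ih (C ++ [x]) W I O (fun y hy => by
            rcases List.mem_append.1 hy with hy | hy
            · exact hC y hy
            · simp at hy; subst hy; exact hv) hW hI hO]
      simp [List.filter_cons, h1, h2, h3, h4]
    · -- warning: insert at the end of W
      have step : PySem.List.insertBy (fun a b => decide (pvKeyA a < pvKeyA b)) x (C ++ (W ++ (I ++ O)))
          = C ++ ((W ++ [x]) ++ (I ++ O)) := by
        rw [show C ++ (W ++ (I ++ O)) = (C ++ W) ++ (I ++ O) by simp,
            insertBy_append_skip _ _ (C ++ W) _ (fun y hy => by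
              rcases List.mem_append.1 hy with hy | hy
              · simp [hv, hC y hy]
              · simp [hv, hW y hy]),
            insertBy_all_before _ _ _ (fun y hy => by
              rcases List.mem_append.1 hy with hy | hy
              · simp [hv, hI y hy]
              · simp [hv, hO y hy])]
        simp
      rw [step, ih C (W ++ [x]) I O hC (fun y hy => by
            rcases List.mem_append.1 hy with hy | hy
            · exact hW y hy
            · simp at hy; subst hy; exact hv) hI hO]
      simp [List.filter_cons, h1, h2, h3, h4]
    · -- info: insert at the end of I
      have step : PySem.List.insertBy (fun a b => decide (pvKeyA a < pvKeyA b)) x (C ++ (W ++ (I ++ O)))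
          = C ++ (W ++ ((I ++ [x]) ++ O)) := by
        rw [show C ++ (W ++ (I ++ O)) = (C ++ (W ++ I)) ++ O by simp,
            insertBy_append_skip _ _ (C ++ (W ++ I)) _ (fun y hy => by
              rcases List.mem_append.1 hy with hy | hy
              · simp [hv, hC y hy]
              · rcases List.mem_append.1 hy with hy | hy
                · simp [hv, hW y hy]
                · simp [hv, hI y hy]),
            insertBy_all_before _ _ _ (fun y hy => by simp [hv, hO y hy])]
        simp
      rw [step, ih C W (I ++ [x]) O hC hW (fun y hy => by
            rcases List.mem_append.1 hy with hy | hy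
            · exact hI y hy
            · simp at hy; subst hy; exact hv) hO]
      simp [List.filter_cons, h1, h2, h3, h4]
    · -- unknown severity: append at the very end
      have step : PySem.List.insertBy (fun a b => decide (pvKeyA a < pvKeyA b)) x (C ++ (W ++ (I ++ O)))
          = C ++ (W ++ (I ++ (O ++ [x]))) := by
        rw [PySem.List.insertBy_of_forall_not_before _ _ _ (fun y hy => by
          simp only [List.mem_append] at hy
          rcases hy with hy | hy | hy | hy
          · simp [hv, hC y hy]
          · simp [hv, hW y hy]
          · simp [hv, hI y hy]
          · simp [hv, hO y hy])]
        simp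
      rw [step, ih C W I (O ++ [x]) hC hW hI (fun y hy => by
            rcases List.mem_append.1 hy with hy | hy
            · exact hO y hy
            · simp at hy; subst hy; exact hv)]
      simp [List.filter_cons, h1, h2, h3, h4]

theorem sorted_eq_buckets (xs : List (List (String × String))) :
    PySem.List.sorted xs pvKeyA
      = xs.filter pCrit ++ xs.filter pWarn ++ xs.filter pInfoB ++ xs.filter pOther := by
  rw [PySem.List.sorted_eq_foldl_insertBy]
  have := sort_buckets_aux xs [] [] [] [] (by simp) (by simp) (by simp) (by simp)
  simp only [List.nil_append] at this
  rw [this]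
  simp [List.append_assoc]

-- B's single pass computes the buckets and the counts
theorem bfold_eq (xs : List (List (String × String))) :
    ∀ st : PvBState, xs.foldl pvBStep st =
      ⟨st.crit ++ xs.filter pCrit, st.warn ++ xs.filter pWarn,
       st.info ++ xs.filter pInfoB, st.other ++ xs.filter pOther,
       st.ncrit + (xs.countP pCrit : Int), st.nwarn + (xs.countP pWarn : Int),
       st.ninfo + (xs.countP pInfo : Int)⟩ := by
  induction xs with
  | nil => intro st; simp
  | cons x t ih =>
    intro st
    simp only [List.foldl_cons, ih]
    have hstep : pvBStep st x =
        if pCrit x then { st with crit := st.crit ++ [x], ncrit := st.ncrit + 1 }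
        else if pWarn x then { st with warn := st.warn ++ [x], nwarn := st.nwarn + 1 }
        else if pInfo x then { st with info := st.info ++ [x], ninfo := st.ninfo + 1 }
        else if pvGet? x "severity" == none then { st with info := st.info ++ [x] }
        else { st with other := st.other ++ [x] } := rfl
    rcases pred_cases x with ⟨h1, h2, h3⟩ | ⟨h1, h2, h3⟩ | ⟨h1, h2, h3⟩ | ⟨h1, h2, h3⟩ <;>
      have h4 : pOther x = (!(pCrit x) && !(pWarn x) && !(pInfoB x)) := rfl <;>
      simp only [h1, h2, h3, Bool.not_true, Bool.not_false, Bool.and_self,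
        Bool.true_and, Bool.false_and, Bool.and_true, Bool.and_false] at h4
    · have h5 : pInfo x = false := by unfold pInfo pInfoB at *; simp_all
      have h6 : (pvGet? x "severity" == none) = false := by unfold pInfoB at h3; simp_all
      rw [hstep]
      simp [h1, h2, h3, h4, h5, h6, List.filter_cons, List.countP_cons]
      omega
    · have h5 : pInfo x = false := by unfold pInfo pInfoB at *; simp_all
      have h6 : (pvGet? x "severity" == none) = false := by unfold pInfoB at h3; simp_all
      rw [hstep]
      simp [h1, h2, h3, h4, h5, h6, List.filter_cons, List.countP_cons]
      omega
    · rw [hstep]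
      by_cases h5 : pInfo x
      · simp [h1, h2, h3, h4, h5, List.filter_cons, List.countP_cons]
        omega
      · have h6 : (pvGet? x "severity" == none) = true := by
          unfold pInfo pInfoB at *; simp_all
        simp [h1, h2, h3, h4, h5, h6, List.filter_cons, List.countP_cons]
    · have h5 : pInfo x = false := by unfold pInfo pInfoB at *; simp_all
      have h6 : (pvGet? x "severity" == none) = false := by unfold pInfoB at h3; simp_all
      rw [hstep]
      simp [h1, h2, h3, h4, h5, h6, List.filter_cons, List.countP_cons]

-- ===== VERDICT (by name: the statement is the Claim_ definition above) =====
theorem build_mod_report_py_spec : Claim_equal_build_mod_report_py := by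
  intro server container game_type conflicts crashes _
  unfold Spec_build_mod_report_py build_mod_report_py build_mod_report_py_alt
  have hsort := sorted_eq_buckets (conflicts ++ crashes)
  have hst := bfold_eq (conflicts ++ crashes) ⟨[], [], [], [], 0, 0, 0⟩
  have hperm : (PySem.List.sorted (conflicts ++ crashes) pvKeyA).Perm (conflicts ++ crashes) :=
    PySem.List.sorted_perm _ _ _
  have hcc := hperm.countP_eq (fun i => pvGet? i "severity" == some "critical")
  have hcw := hperm.countP_eq (fun i => pvGet? i "severity" == some "warning")
  have hci := hperm.countP_eq (fun i => pvGet? i "severity" == some "info")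
  have hlen := hperm.length_eq
  simp only [hcc, hcw, hci, hlen]
  simp only [List.nil_append, hst, hsort, zero_add]
  have ec : (fun i => pvGet? i "severity" == some "critical") = pCrit := rfl
  have ew : (fun i => pvGet? i "severity" == some "warning") = pWarn := rfl
  have ei : (fun i => pvGet? i "severity" == some "info") = pInfo := rfl
  simp only [ec, ew, ei, List.singleton_append, List.cons_append, List.nil_append]
  have hperm2 : (List.filter pCrit (conflicts ++ crashes) ++ List.filter pWarn (conflicts ++ crashes) ++ List.filter pInfoB (conflicts ++ crashes) ++ List.filter pOther (conflicts ++ crashes)).Perm (conflicts ++ crashes) := hsort ▸ hperm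
  simp only [hperm2.length_eq]
  by_cases hemp : (List.filter pCrit (conflicts ++ crashes) ++ List.filter pWarn (conflicts ++ crashes) ++ List.filter pInfoB (conflicts ++ crashes) ++ List.filter pOther (conflicts ++ crashes)).isEmpty = true
  · simp only [hemp, if_pos]
  · simp only [hemp, Bool.false_eq_true, if_neg, not_false_iff]
    have hfold : ∀ acc : List String,
        (PySem.List.enumerate (List.filter pCrit (conflicts ++ crashes) ++ List.filter pWarn (conflicts ++ crashes) ++ List.filter pInfoB (conflicts ++ crashes) ++ List.filter pOther (conflicts ++ crashes)) 1).foldl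
          (fun acc p =>
            (if pvGetD p.2 "conflicting_plugins" "" ≠ "" then
                acc ++ ["--- Issue #" ++ PySem.Int.toStr p.1 ++ " [" ++ PySem.Str.upper (pvGetD p.2 "severity" "info") ++ "] ---"] ++
                  ["Plugins: " ++ pvGetD p.2 "conflicting_plugins" ""]
              else
                acc ++ ["--- Issue #" ++ PySem.Int.toStr p.1 ++ " [" ++ PySem.Str.upper (pvGetD p.2 "severity" "info") ++ "] ---"]) ++
              ["Problem: " ++ pvGetD p.2 "description" "Unknown"] ++
              ["Fix: " ++ pvGetD p.2 "recommendation" "No recommendation available."] ++ [""]) acc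
        = (PySem.List.enumerate (List.filter pCrit (conflicts ++ crashes) ++ List.filter pWarn (conflicts ++ crashes) ++ List.filter pInfoB (conflicts ++ crashes) ++ List.filter pOther (conflicts ++ crashes)) 1).foldl
          (fun acc p =>
            acc ++ (["--- Issue #" ++ PySem.Int.toStr p.1 ++ " [" ++ PySem.Str.upper (pvGetD p.2 "severity" "info") ++ "] ---"] ++
              (if pvGetD p.2 "conflicting_plugins" "" ≠ "" then ["Plugins: " ++ pvGetD p.2 "conflicting_plugins" ""] else []) ++
              ["Problem: " ++ pvGetD p.2 "description" "Unknown"] ++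
              ["Fix: " ++ pvGetD p.2 "recommendation" "No recommendation available."] ++ [""])) acc := by
      intro acc
      apply List.foldl_ext
      intro a p _
      by_cases h : pvGetD p.2 "conflicting_plugins" "" ≠ "" <;>
        simp [h, List.append_assoc]
    by_cases hc : List.countP pCrit (conflicts ++ crashes) = 0
    · simp only [hc, Nat.cast_zero, gt_iff_lt, lt_self_iff_false, if_false,
        eq_self_iff_true, not_true, not_false_eq_true]
      rw [hfold]
      simp
    · have hpos : (0:Int) < (List.countP pCrit (conflicts ++ crashes) : Int) := by
        exact_mod_cast Nat.pos_of_ne_zero hc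
      simp only [if_pos hpos, if_pos (by omega : ¬ ((List.countP pCrit (conflicts ++ crashes) : Int) = 0))]
      rw [hfold]
      simp
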